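-- pv_equiv track=rewrite | github.com/tianocore/edk2-pytool-library | docgen/generate.py | ConvertToFriendlyName
-- ===== SOURCE A (Python) =====
-- def ConvertToFriendlyName(string):
--     if string.lower().endswith(".md"):
--         string = string[:-3]
--     string = string.replace("_", " ").strip()  # strip snake case
--     string = ' '.join(string.split())  # strip duplicate spaces
--
--     # Handle camel case
--     newstring = ""
--     prev_char_lowercase = False
--     for i in string:
--         if(not prev_char_lowercase):
--             newstring += i
--         else:
--             if(i.isupper()):
--                 newstring += " " + i
--             else:
--                 newstring += i
--         prev_char_lowercase = i.islower()
--
--     return newstring.capitalize()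
-- ===== SOURCE B (Python) =====
-- def ConvertToFriendlyName(string):
--     if string.lower().endswith(".md"):
--         string = string[:-3]
--     s = " ".join(string.replace("_", " ").strip().split())
--     # segment the string into camelCase words: a cut falls before every
--     # uppercase letter that is preceded by a lowercase one; slice at the
--     # cut indices and join the word list with single spaces
--     cuts = [i for i in range(len(s)) if i > 0 and s[i - 1].islower() and s[i].isupper()]
--     words = [s[a:b] for a, b in zip([0] + cuts, cuts + [len(s)])]
--     return " ".join(words).capitalize()
-- ===== Notes on version B (the rewrite author's own statement) =====
-- stated objective: alternative
-- what changed: A inserts spaces with a stateful per-character loop carrying a prev_char_lowercase flag; B instead computes the list of cut indices (positions where an uppercase letter follows a lowercase one), slices the string into camelCase words at those indices, and joins the word list with spaces.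
import Mathlib
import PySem

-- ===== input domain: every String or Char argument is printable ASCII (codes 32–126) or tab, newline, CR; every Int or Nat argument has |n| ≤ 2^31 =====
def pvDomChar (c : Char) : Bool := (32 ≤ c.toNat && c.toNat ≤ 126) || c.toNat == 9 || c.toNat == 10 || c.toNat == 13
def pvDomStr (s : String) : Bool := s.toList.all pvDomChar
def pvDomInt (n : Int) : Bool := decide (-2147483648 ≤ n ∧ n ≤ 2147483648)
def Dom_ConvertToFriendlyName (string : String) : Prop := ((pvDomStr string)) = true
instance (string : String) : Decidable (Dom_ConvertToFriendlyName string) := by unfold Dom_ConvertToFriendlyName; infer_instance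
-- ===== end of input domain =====

-- B replaces A's stateful per-character camel-case loop (prev_char_lowercase flag) by a
-- word-segmentation algorithm: compute the cut indices, slice the string into camelCase
-- words, join them with spaces; objective: alternative. Equal return value on all inputs.

-- shared helper: Python's str.capitalize() — first char uppercased, the rest lowercased;
-- exact on the ASCII domain (where titlecase = uppercase)
def pyCapitalize (cs : List Char) : List Char :=
  match cs with
  | [] => []
  | c :: rest => PySem.Chars.upperChar c :: rest.map PySem.Chars.lowerChar

-- ===== PORT A =====
-- A's loop body: state = (newstring, prev_char_lowercase)
def camelStep (p : List Char × Bool) (i : Char) : List Char × Bool :=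
  (if !p.2 then p.1 ++ [i]
   else if PySem.Chars.isupper i then p.1 ++ [' ', i]
   else p.1 ++ [i],
   PySem.Chars.islower i)

def ConvertToFriendlyName (string : String) : String :=
  let cs := string.toList
  let cs := if PySem.Chars.endswith (PySem.Chars.lower cs) ".md".toList
            then PySem.Chars.slice cs none (some (-3)) else cs
  let cs := PySem.Chars.strip (PySem.Chars.replace cs ['_'] [' '])
  let cs := PySem.Chars.join [' '] (PySem.Chars.split₀ cs)
  let r := cs.foldl camelStep ([], false)
  String.ofList (pyCapitalize r.1)

-- ===== PORT B =====
-- B's cut test for index i: 'i > 0 and s[i-1].islower() and s[i].isupper()'; both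
-- accesses are in range whenever the test is evaluated (0 < i < len s), so getD is exact
def bnd (s : List Char) (i : Nat) : Bool :=
  decide (0 < i) && PySem.Chars.islower (s.getD (i - 1) ' ') && PySem.Chars.isupper (s.getD i ' ')

-- '[i for i in range(len(s)) if …]'
def cutsB (s : List Char) : List Nat := (List.range s.length).filter (bnd s)

-- one Python slice s[a:b]; here always 0 ≤ a ≤ b ≤ len s, where s[a:b] = drop a, take (b-a)
def segsOf (s : List Char) (cuts : List Nat) : List (List Char) :=
  ((0 :: cuts).zip (cuts ++ [s.length])).map (fun p => (s.drop p.1).take (p.2 - p.1))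

def ConvertToFriendlyName_alt (string : String) : String :=
  let cs := string.toList
  let cs := if PySem.Chars.endswith (PySem.Chars.lower cs) ".md".toList
            then PySem.Chars.slice cs none (some (-3)) else cs
  let s := PySem.Chars.join [' '] (PySem.Chars.split₀ (PySem.Chars.strip (PySem.Chars.replace cs ['_'] [' '])))
  let words := segsOf s (cutsB s)
  String.ofList (pyCapitalize (PySem.Chars.join [' '] words))

-- ===== PRECONDITION & SPEC =====
def Spec_ConvertToFriendlyName (string : String) (out : String) : Prop := out = ConvertToFriendlyName_alt string
instance (string : String) (out : String) : Decidable (Spec_ConvertToFriendlyName string out) := by unfold Spec_ConvertToFriendlyName; infer_instance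

-- ===== CLAIM (what is proved, stated in full; the proofs are below) =====
def Claim_equal_ConvertToFriendlyName : Prop := ∀ (string : String), Dom_ConvertToFriendlyName string → Spec_ConvertToFriendlyName string (ConvertToFriendlyName string)

-- ===== LEMMAS AND PROOFS =====

-- A's camel loop, characterised: the accumulated string only grows, by a
-- prev-dependent chunk per character
def camelG (prev : Bool) : List Char → List Char
  | [] => []
  | c :: rest => (if prev && PySem.Chars.isupper c then [' ', c] else [c]) ++ camelG (PySem.Chars.islower c) rest

theorem foldl_camelStep (s : List Char) : ∀ (acc : List Char) (prev : Bool),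
    (s.foldl camelStep (acc, prev)).1 = acc ++ camelG prev s := by
  induction s with
  | nil => intro acc prev; simp [camelG]
  | cons c rest ih =>
    intro acc prev
    simp only [List.foldl_cons, camelStep, camelG]
    cases prev with
    | false => simp [ih]
    | true =>
      by_cases h : PySem.Chars.isupper c = true
      · simp [h, ih]
      · simp [Bool.not_eq_true] at h; simp [h, ih]

theorem camelG_head_congr (c : Char) (rest : List Char)
    (h : (PySem.Chars.islower c && PySem.Chars.isupper (rest.getD 0 ' ')) = false) :
    camelG (PySem.Chars.islower c) rest = camelG false rest := by
  cases rest with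
  | nil => rfl
  | cons d t => simp only [List.getD_cons_zero] at h; simp [camelG, h]

theorem bnd_zero (s : List Char) : bnd s 0 = false := by simp [bnd]

theorem bnd_cons_succ (c : Char) (rest : List Char) (i : Nat) :
    bnd (c :: rest) (i + 1) =
      (if i = 0 then PySem.Chars.islower c && PySem.Chars.isupper (rest.getD 0 ' ')
       else bnd rest i) := by
  cases i with
  | zero => simp [bnd]
  | succ j => simp [bnd]

theorem filter_range_succ (p : Nat → Bool) (n : Nat) :
    (List.range (n + 1)).filter p =
      (if p 0 then [0] else []) ++ ((List.range n).filter (fun i => p (i + 1))).map (· + 1) := by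
  rw [List.range_succ_eq_map, List.filter_cons]
  by_cases h : p 0 = true <;>
    simp [h, List.filter_map, Function.comp_def, Nat.succ_eq_add_one]

theorem cutsB_cons (c : Char) (rest : List Char) :
    cutsB (c :: rest) =
      (if PySem.Chars.islower c && PySem.Chars.isupper (rest.getD 0 ' ') then [1] else []) ++
        (cutsB rest).map (· + 1) := by
  unfold cutsB
  cases rest with
  | nil =>
    have hup : PySem.Chars.isupper ' ' = false := by decide
    simp [List.range_one, List.range_zero, bnd_zero, hup]
  | cons d t =>
    rw [show (c :: d :: t).length = (d :: t).length + 1 from rfl, filter_range_succ,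
        bnd_zero]
    have h1 : (List.range (d :: t).length).filter (fun i => bnd (c :: d :: t) (i + 1)) =
        (if PySem.Chars.islower c && PySem.Chars.isupper ((d :: t).getD 0 ' ') then [0] else []) ++
          ((List.range t.length).filter (fun i => bnd (d :: t) (i + 1))).map (· + 1) := by
      rw [show (d :: t).length = t.length + 1 from rfl, filter_range_succ]
      simp [bnd_cons_succ]
    have h2 : (List.range (d :: t).length).filter (bnd (d :: t)) =
        ((List.range t.length).filter (fun i => bnd (d :: t) (i + 1))).map (· + 1) := by
      rw [show (d :: t).length = t.length + 1 from rfl, filter_range_succ, bnd_zero]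
      simp
    rw [h1, h2]
    by_cases hl : PySem.Chars.islower c = true <;> by_cases hu : PySem.Chars.isupper d = true <;>
      simp [hl, hu]

theorem zipmap_shift (c : Char) (rest : List Char) (L M : List Nat) :
    ((L.map (· + 1)).zip (M.map (· + 1))).map
        (fun p => (((c :: rest).drop p.1).take (p.2 - p.1))) =
      (L.zip M).map (fun p => ((rest.drop p.1).take (p.2 - p.1))) := by
  rw [List.zip_map, List.map_map]
  apply List.map_congr_left
  intro p _
  simp [Prod.map]

theorem segsOf_nil_cuts (s : List Char) : segsOf s [] = [s] := by
  simp [segsOf]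

theorem join_main (s : List Char) :
    PySem.Chars.join [' '] (segsOf s (cutsB s)) = camelG false s := by
  induction s with
  | nil => simp [cutsB, segsOf, camelG, PySem.Chars.join_singleton]
  | cons c rest ih =>
    rw [cutsB_cons]
    by_cases h : (PySem.Chars.islower c && PySem.Chars.isupper (rest.getD 0 ' ')) = true
    · -- a cut right after c: first word is [c], the rest are rest's words
      obtain ⟨d, t, hrest⟩ : ∃ d t, rest = d :: t := by
        cases rest with
        | nil =>
          exfalso
          simp only [List.getD_nil] at h
          rw [Bool.and_eq_true] at h
          exact absurd h.2 (by decide)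
        | cons d t => exact ⟨d, t, rfl⟩
      have hsegs : segsOf (c :: rest) (1 :: (cutsB rest).map (· + 1)) =
          [c] :: segsOf rest (cutsB rest) := by
        unfold segsOf
        have e1 : (1 :: (cutsB rest).map (· + 1)) = ((0 :: cutsB rest).map (· + 1)) := by simp
        have e2 : ((cutsB rest).map (· + 1) ++ [(c :: rest).length]) =
            ((cutsB rest ++ [rest.length]).map (· + 1)) := by simp
        simp only [List.cons_append, List.zip_cons_cons, List.map_cons]
        rw [e2, e1, zipmap_shift]
        simp
      rw [if_pos h, List.singleton_append, hsegs]
      obtain ⟨w, ws, hw⟩ : ∃ w ws, segsOf rest (cutsB rest) = w :: ws := by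
        unfold segsOf; cases cutsB rest <;> exact ⟨_, _, rfl⟩
      rw [hw, PySem.Chars.join_cons_cons, ← hw, ih]
      subst hrest
      simp only [List.getD_cons_zero] at h
      rw [Bool.and_eq_true] at h
      obtain ⟨hc, hd⟩ := h
      simp [camelG, hc, hd]
    · -- no cut after c: c is prepended to rest's first word
      rw [if_neg h, List.nil_append]
      rw [Bool.not_eq_true] at h
      have hG : camelG false (c :: rest) = c :: camelG false rest := by
        simp [camelG, camelG_head_congr c rest h]
      cases hcuts : cutsB rest with
      | nil =>
        rw [hcuts] at ih
        rw [segsOf_nil_cuts, PySem.Chars.join_singleton] at ih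
        simp only [List.map_nil, segsOf_nil_cuts, PySem.Chars.join_singleton]
        rw [hG, ← ih]
      | cons a t' =>
        rw [hcuts] at ih
        have hsegs : segsOf (c :: rest) ((a :: t').map (· + 1)) =
            (c :: (rest.take a)) :: ((a :: t').zip (t' ++ [rest.length])).map
              (fun p => ((rest.drop p.1).take (p.2 - p.1))) := by
          unfold segsOf
          have e2 : (t'.map (· + 1) ++ [(c :: rest).length]) =
              ((t' ++ [rest.length]).map (· + 1)) := by simp
          simp only [List.map_cons, List.cons_append, List.zip_cons_cons]
          rw [e2, show ((a + 1) :: t'.map (· + 1)) = ((a :: t').map (· + 1)) from rfl,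
              zipmap_shift]
          simp
        have hsegs' : segsOf rest (a :: t') =
            (rest.take a) :: ((a :: t').zip (t' ++ [rest.length])).map
              (fun p => ((rest.drop p.1).take (p.2 - p.1))) := by
          unfold segsOf
          simp
        have hjoin : ∀ (w : List Char) (ws : List (List Char)),
            PySem.Chars.join [' '] ((c :: w) :: ws) = c :: PySem.Chars.join [' '] (w :: ws) := by
          intro w ws
          cases ws with
          | nil => rw [PySem.Chars.join_singleton, PySem.Chars.join_singleton]
          | cons y ys => rw [PySem.Chars.join_cons_cons, PySem.Chars.join_cons_cons]; rfl
        rw [hsegs, hjoin, ← hsegs', ih, hG]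

-- ===== VERDICT (by name: the statement is the Claim_ definition above) =====
theorem ConvertToFriendlyName_spec : Claim_equal_ConvertToFriendlyName := by
  intro string _
  unfold Spec_ConvertToFriendlyName ConvertToFriendlyName ConvertToFriendlyName_alt
  simp only [foldl_camelStep, List.nil_append, join_main]
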